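-- pv_equiv track=rewrite | github.com/BrianMills2718/onto-canon6 | src/onto_canon6/pipeline/progressive_extractor.py | _normalize_lemma
-- ===== SOURCE A (Python) =====
-- _VERB_SUFFIXES: list[str] = ["ing", "ed", "es", "s"]
--
-- def _normalize_lemma(verb: str) -> list[str]:
--     """Produce candidate lemma forms for a raw relationship verb.
--
--     Returns a list of candidate strings to try against the Predicate Canon,
--     from most specific (raw lowered) to most general (suffix-stripped).
--     This is intentionally simple — a basic approach that handles common
--     English verb inflections without pulling in a full NLP dependency.
--
--     For "ed" and "ing" suffixes, also tries adding back a trailing 'e'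
--     since English frequently drops it (e.g. "abated" -> "abat" -> "abate",
--     "used" -> "us" -> "use").
--     """
--     base = verb.lower().strip()
--     candidates = [base]
--     seen = {base}
--     for suffix in _VERB_SUFFIXES:
--         if base.endswith(suffix) and len(base) > len(suffix) + 1:
--             stripped = base[: -len(suffix)]
--             if stripped not in seen:
--                 candidates.append(stripped)
--                 seen.add(stripped)
--             # For -ed and -ing, also try with trailing 'e' restored
--             if suffix in ("ed", "ing"):
--                 with_e = stripped + "e"
--                 if with_e not in seen:
--                     candidates.append(with_e)
--                     seen.add(with_e)
--     return candidates
-- ===== SOURCE B (Python) =====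
-- def _normalize_lemma(verb: str) -> list[str]:
--     """Candidate lemma forms, as a closed-form decision tree.
--
--     The four suffixes are mutually exclusive except that "es" implies "s",
--     and no generated form can collide with another (all have distinct
--     lengths), so no dedup bookkeeping is needed at all: each case returns
--     its complete candidate list directly.
--     """
--     base = verb.lower().strip()
--     if base.endswith("ing") and len(base) > 4:
--         return [base, base[:-3], base[:-3] + "e"]
--     if base.endswith("ed") and len(base) > 3:
--         return [base, base[:-2], base[:-2] + "e"]
--     if base.endswith("es") and len(base) > 3:
--         return [base, base[:-2], base[:-1]]
--     if base.endswith("s") and len(base) > 2: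
--         return [base, base[:-1]]
--     return [base]
-- ===== Notes on version B (the rewrite author's own statement) =====
-- stated objective: simpler
-- what changed: B replaces A's suffix loop with seen-set bookkeeping by a loop-free closed-form decision tree with early returns: the four suffix cases are mutually exclusive (except that 'es' implies 's') and the generated forms all have distinct lengths, so no deduplication is needed and each case returns its complete candidate list directly.
import Mathlib
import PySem

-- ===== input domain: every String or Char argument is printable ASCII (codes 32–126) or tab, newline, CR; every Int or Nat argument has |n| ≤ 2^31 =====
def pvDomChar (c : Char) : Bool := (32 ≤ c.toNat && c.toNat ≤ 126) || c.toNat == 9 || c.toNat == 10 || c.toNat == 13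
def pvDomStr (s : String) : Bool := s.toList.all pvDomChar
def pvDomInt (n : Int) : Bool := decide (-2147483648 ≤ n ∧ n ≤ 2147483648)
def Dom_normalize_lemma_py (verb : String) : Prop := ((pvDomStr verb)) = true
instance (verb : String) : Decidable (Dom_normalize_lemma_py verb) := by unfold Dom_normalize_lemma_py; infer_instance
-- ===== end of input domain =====

-- B replaces A's suffix loop with seen-set bookkeeping by a closed-form decision tree
-- (the four suffix cases are mutually exclusive up to "es"⊆"s" and no generated forms
-- can collide, so each case returns its complete list directly); objective: simpler.

-- ===== PORT A =====
-- the module-level constant _VERB_SUFFIXES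
def pvVerbSuffixes : List String := ["ing", "ed", "es", "s"]

-- A's loop body, named: one iteration of 'for suffix in _VERB_SUFFIXES' over (candidates, seen)
def pvStepA (base : String) (st : List String × PySem.Set String) (suffix : String) :
    List String × PySem.Set String :=
  if PySem.Str.endswith base suffix = true ∧ PySem.Str.len base > PySem.Str.len suffix + 1 then
    let stripped := PySem.Str.slice base none (some (-(PySem.Str.len suffix)))
    let st1 := if stripped ∈ st.2 then st else (st.1 ++ [stripped], PySem.Set.add st.2 stripped)
    if suffix = "ed" ∨ suffix = "ing" then
      let with_e := stripped ++ "e"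
      if with_e ∈ st1.2 then st1 else (st1.1 ++ [with_e], PySem.Set.add st1.2 with_e)
    else st1
  else st

def normalize_lemma_py (verb : String) : List String :=
  let base := PySem.Str.strip (PySem.Str.lower verb)
  (pvVerbSuffixes.foldl (pvStepA base) ([base], PySem.Set.ofList [base])).1

-- ===== PORT B =====
-- B is a loop-free decision tree: each early return ported as one branch
def normalize_lemma_py_alt (verb : String) : List String :=
  let base := PySem.Str.strip (PySem.Str.lower verb)
  if PySem.Str.endswith base "ing" = true ∧ PySem.Str.len base > 4 then
    [base, PySem.Str.slice base none (some (-3)),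
     PySem.Str.slice base none (some (-3)) ++ "e"]
  else if PySem.Str.endswith base "ed" = true ∧ PySem.Str.len base > 3 then
    [base, PySem.Str.slice base none (some (-2)),
     PySem.Str.slice base none (some (-2)) ++ "e"]
  else if PySem.Str.endswith base "es" = true ∧ PySem.Str.len base > 3 then
    [base, PySem.Str.slice base none (some (-2)), PySem.Str.slice base none (some (-1))]
  else if PySem.Str.endswith base "s" = true ∧ PySem.Str.len base > 2 then
    [base, PySem.Str.slice base none (some (-1))]
  else [base]

-- ===== PRECONDITION & SPEC =====
def Spec_normalize_lemma_py (verb : String) (out : List String) : Prop := out = normalize_lemma_py_alt verb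
instance (verb : String) (out : List String) : Decidable (Spec_normalize_lemma_py verb out) := by unfold Spec_normalize_lemma_py; infer_instance

-- ===== CLAIM (what is proved, stated in full; the proofs are below) =====
def Claim_equal_normalize_lemma_py : Prop := ∀ (verb : String), Dom_normalize_lemma_py verb → Spec_normalize_lemma_py verb (normalize_lemma_py verb)

-- ===== LEMMAS AND PROOFS =====

-- a nonempty suffix determines the last character
theorem pv_suffix_getLast? {p l : List Char} (h : p <:+ l) (hp : p ≠ []) :
    l.getLast? = p.getLast? := by
  obtain ⟨t, rfl⟩ := h
  rw [List.getLast?_append]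
  cases hpl : p.getLast? with
  | none => exact absurd (List.getLast?_eq_none_iff.mp hpl) hp
  | some c => rfl

theorem pv_endswith_getLast (base p : String) (c : Char) (hp : p.toList.getLast? = some c)
    (h : PySem.Str.endswith base p = true) : base.toList.getLast? = some c := by
  rw [PySem.Str.endswith_eq, PySem.Chars.endswith_iff] at h
  rw [pv_suffix_getLast? h (by intro h0; rw [h0] at hp; simp at hp)]
  exact hp

-- two candidate suffixes with different last characters cannot both match
theorem pv_endswith_excl (base p q : String) (c d : Char)
    (hc : p.toList.getLast? = some c) (hd : q.toList.getLast? = some d) (hcd : c ≠ d)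
    (h : PySem.Str.endswith base p = true) : PySem.Str.endswith base q = false := by
  cases hq : PySem.Str.endswith base q with
  | false => rfl
  | true =>
    exact absurd (Option.some_injective _
      ((pv_endswith_getLast base p c hc h).symm.trans (pv_endswith_getLast base q d hd hq)))
      hcd

theorem pv_es_imp_s (base : String) (h : PySem.Str.endswith base "es" = true) :
    PySem.Str.endswith base "s" = true := by
  rw [PySem.Str.endswith_eq, PySem.Chars.endswith_iff] at *
  exact (show ("s".toList <:+ "es".toList) by decide).trans h

-- toList of the slices B (and A, after evaluating len of the suffix) uses
theorem pv_slice3 (base : String) :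
    (PySem.Str.slice base none (some (-3))).toList = base.toList.take (base.toList.length - 3) := by
  rw [PySem.Str.toList_slice, PySem.Chars.slice_eq_listSlice,
    PySem.List.slice_to_neg_ofNat _ 3 (by omega)]

theorem pv_slice2 (base : String) :
    (PySem.Str.slice base none (some (-2))).toList = base.toList.take (base.toList.length - 2) := by
  rw [PySem.Str.toList_slice, PySem.Chars.slice_eq_listSlice,
    PySem.List.slice_to_neg_ofNat _ 2 (by omega)]

theorem pv_slice1 (base : String) :
    (PySem.Str.slice base none (some (-1))).toList = base.toList.take (base.toList.length - 1) := by
  rw [PySem.Str.toList_slice, PySem.Chars.slice_eq_listSlice,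
    PySem.List.slice_to_neg_one, List.dropLast_eq_take]

theorem pv_ne_of_len {s t : String} (h : s.toList.length ≠ t.toList.length) : s ≠ t := by
  intro e; exact h (by rw [e])

-- ===== VERDICT (by name: the statement is the Claim_ definition above) =====
theorem normalize_lemma_py_spec : Claim_equal_normalize_lemma_py := by
  intro verb _
  unfold Spec_normalize_lemma_py normalize_lemma_py normalize_lemma_py_alt
  simp only []
  generalize PySem.Str.strip (PySem.Str.lower verb) = base
  have t3 := pv_slice3 base
  have t2 := pv_slice2 base
  have t1 := pv_slice1 base
  by_cases H1 : PySem.Str.endswith base "ing" = true ∧ PySem.Str.len base > 4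
  · -- the -ing case: last char 'g', no other suffix matches
    have hEd := pv_endswith_excl base "ing" "ed" 'g' 'd' (by decide) (by decide) (by decide) H1.1
    have hEs := pv_endswith_excl base "ing" "es" 'g' 's' (by decide) (by decide) (by decide) H1.1
    have hS := pv_endswith_excl base "ing" "s" 'g' 's' (by decide) (by decide) (by decide) H1.1
    obtain ⟨hE, hL⟩ := H1
    rw [if_pos ⟨hE, hL⟩]
    simp at hE hL hEd hEs hS
    have hg3 : PySem.Str.slice base none (some (-3)) ≠ base := by
      apply pv_ne_of_len; rw [t3]; simp; omega
    have hg3e : PySem.Str.slice base none (some (-3)) ++ "e" ≠ base := by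
      apply pv_ne_of_len; simp [t3] <;> omega
    have hg3e' : PySem.Str.slice base none (some (-3)) ++ "e"
        ≠ PySem.Str.slice base none (some (-3)) := by
      apply pv_ne_of_len; simp [t3]
    simp [pvVerbSuffixes, pvStepA, hE, hL, hEd, hEs, hS,
      PySem.Set.ofList, PySem.Set.add, hg3, hg3e, hg3e']
  · rw [if_neg H1]
    by_cases H2 : PySem.Str.endswith base "ed" = true ∧ PySem.Str.len base > 3
    · -- the -ed case: last char 'd'
      have hIng := pv_endswith_excl base "ed" "ing" 'd' 'g' (by decide) (by decide) (by decide) H2.1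
      have hEs := pv_endswith_excl base "ed" "es" 'd' 's' (by decide) (by decide) (by decide) H2.1
      have hS := pv_endswith_excl base "ed" "s" 'd' 's' (by decide) (by decide) (by decide) H2.1
      obtain ⟨hE, hL⟩ := H2
      rw [if_pos ⟨hE, hL⟩]
      simp at hE hL hIng hEs hS
      have hg2 : PySem.Str.slice base none (some (-2)) ≠ base := by
        apply pv_ne_of_len; rw [t2]; simp; omega
      have hg2e : PySem.Str.slice base none (some (-2)) ++ "e" ≠ base := by
        apply pv_ne_of_len; simp [t2]; omega
      have hg2e' : PySem.Str.slice base none (some (-2)) ++ "e"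
          ≠ PySem.Str.slice base none (some (-2)) := by
        apply pv_ne_of_len; simp [t2]
      simp [pvVerbSuffixes, pvStepA, hE, hL, hIng, hEs, hS,
        PySem.Set.ofList, PySem.Set.add, hg2, hg2e, hg2e']
    · rw [if_neg H2]
      by_cases H3 : PySem.Str.endswith base "es" = true ∧ PySem.Str.len base > 3
      · -- the -es case: last char 's'; "s" also matches and appends one more form
        have hIng := pv_endswith_excl base "es" "ing" 's' 'g' (by decide) (by decide) (by decide) H3.1
        have hEd := pv_endswith_excl base "es" "ed" 's' 'd' (by decide) (by decide) (by decide) H3.1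
        have hS := pv_es_imp_s base H3.1
        obtain ⟨hE, hL⟩ := H3
        rw [if_pos ⟨hE, hL⟩]
        simp at hE hL hIng hEd hS
        have hg2 : PySem.Str.slice base none (some (-2)) ≠ base := by
          apply pv_ne_of_len; rw [t2]; simp; omega
        have hg1 : PySem.Str.slice base none (some (-1)) ≠ base := by
          apply pv_ne_of_len; rw [t1]; simp; omega
        have hg12 : PySem.Str.slice base none (some (-1))
            ≠ PySem.Str.slice base none (some (-2)) := by
          apply pv_ne_of_len; rw [t1, t2]; simp; omega
        simp [pvVerbSuffixes, pvStepA, hE, hL, hIng, hEd, hS,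
          PySem.Set.ofList, PySem.Set.add, hg2, hg1, hg12]
        rw [if_pos (show 2 < base.length by omega)]
      · rw [if_neg H3]
        by_cases H4 : PySem.Str.endswith base "s" = true ∧ PySem.Str.len base > 2
        · -- the plain -s case: last char 's'; A's "es" guard is exactly ¬H3
          have hIng := pv_endswith_excl base "s" "ing" 's' 'g' (by decide) (by decide) (by decide) H4.1
          have hEd := pv_endswith_excl base "s" "ed" 's' 'd' (by decide) (by decide) (by decide) H4.1
          obtain ⟨hE, hL⟩ := H4
          rw [if_pos ⟨hE, hL⟩]
          simp at hE hL hIng hEd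
          have hN3 : ¬(PySem.Chars.endswith base.toList ['e', 's'] = true ∧ 3 < base.length) := by
            simpa using H3
          have hg1 : PySem.Str.slice base none (some (-1)) ≠ base := by
            apply pv_ne_of_len; rw [t1]; simp; omega
          simp [pvVerbSuffixes, pvStepA, hE, hL, hIng, hEd, hN3,
            PySem.Set.ofList, PySem.Set.add, hg1]
        · -- no suffix case: every guard in A's loop is exactly one of ¬H1..¬H4
          rw [if_neg H4]
          have hN1 : ¬(PySem.Chars.endswith base.toList ['i', 'n', 'g'] = true ∧ 4 < base.length) := by
            simpa using H1
          have hN2 : ¬(PySem.Chars.endswith base.toList ['e', 'd'] = true ∧ 3 < base.length) := by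
            simpa using H2
          have hN3 : ¬(PySem.Chars.endswith base.toList ['e', 's'] = true ∧ 3 < base.length) := by
            simpa using H3
          have hN4 : ¬(PySem.Chars.endswith base.toList ['s'] = true ∧ 2 < base.length) := by
            simpa using H4
          simp [pvVerbSuffixes, pvStepA, hN1, hN2, hN3, hN4]
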